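-- pv_equiv track=rewrite | github.com/M1tsumi/ArcPythonBot | cogs/minigame_daily.py | apply_xp_and_level
-- ===== SOURCE A (Python) =====
-- from typing import Any, Dict, Optional, List, Tuple
--
-- def xp_needed_for_next_level(current_level: int) -> int:
--     """XP needed to go from current_level to current_level+1.
--
--     Formula: 100 + 25 * (level - 1)^2 (gentle quadratic growth)
--     """
--     level_minus_one = max(0, current_level - 1)
--     return 100 + 25 * (level_minus_one * level_minus_one)
--
-- def apply_xp_and_level(player: Dict[str, Any], gained_xp: int) -> Dict[str, Any]:
--     player["xp"] = int(player.get("xp", 0)) + int(gained_xp)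
--     # Level up while we have enough XP
--     leveled_up = 0
--     while True:
--         current_level = int(player.get("level", 1))
--         needed = xp_needed_for_next_level(current_level)
--         # Compute XP toward current level: we model levels based on remaining bucket, so subtract per level
--         if player["xp"] >= needed:
--             player["xp"] -= needed
--             player["level"] = current_level + 1
--             leveled_up += 1
--         else:
--             break
--
--     return {"leveled_up": leveled_up, "xp_to_next": xp_needed_for_next_level(player.get("level", 1)) - player.get("xp", 0)}
-- ===== SOURCE B (Python) =====
-- # Alternative re-implementation: closed-form cubic prefix sum of the level costs +
-- # exponential/binary search for the number of level-ups, instead of A's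
-- # one-subtraction-per-level loop (O(log k) vs k iterations).  Mutates player["xp"]/["level"] like A.
--
-- def _tri(n):
--     # sum of squares 1^2 + ... + n^2 (0 for n <= 0; exact for all ints)
--     return n * (n + 1) * (2 * n + 1) // 6
--
-- def _cost(L, k):
--     # total XP needed to climb k levels starting at level L >= 1
--     return 100 * k + 25 * (_tri(L - 2 + k) - _tri(L - 2))
--
-- def xp_needed_for_next_level(current_level):
--     m = max(0, current_level - 1)
--     return 100 + 25 * m * m
--
-- def apply_xp_and_level(player, gained_xp):
--     xp = int(player.get("xp", 0)) + int(gained_xp)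
--     level = int(player.get("level", 1))
--     ups = 0
--     if level < 1:
--         # below level 1 every step costs a flat 100
--         m = max(0, min(1 - level, xp // 100))
--         level += m
--         xp -= 100 * m
--         ups += m
--     if level >= 1 and _cost(level, 1) <= xp:
--         hi = 1
--         while _cost(level, 2 * hi) <= xp:
--             hi *= 2
--         lo, hi2 = hi, 2 * hi
--         while lo + 1 < hi2:
--             mid = (lo + hi2) // 2
--             if _cost(level, mid) <= xp:
--                 lo = mid
--             else:
--                 hi2 = mid
--         xp -= _cost(level, lo)
--         level += lo
--         ups += lo
--     player["xp"] = xp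
--     if ups:
--         player["level"] = level
--     return {"leveled_up": ups, "xp_to_next": xp_needed_for_next_level(level) - xp}
-- ===== Notes on version B (the rewrite author's own statement) =====
-- stated objective: alternative
-- what changed: Replaces A's subtract-one-level-at-a-time while-loop with a closed-form prefix sum of the quadratic level costs (sum of squares) plus exponential + binary search for the number of level-ups; O(log k) cost evaluations instead of k loop iterations in the number k of level-ups.
import Mathlib
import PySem

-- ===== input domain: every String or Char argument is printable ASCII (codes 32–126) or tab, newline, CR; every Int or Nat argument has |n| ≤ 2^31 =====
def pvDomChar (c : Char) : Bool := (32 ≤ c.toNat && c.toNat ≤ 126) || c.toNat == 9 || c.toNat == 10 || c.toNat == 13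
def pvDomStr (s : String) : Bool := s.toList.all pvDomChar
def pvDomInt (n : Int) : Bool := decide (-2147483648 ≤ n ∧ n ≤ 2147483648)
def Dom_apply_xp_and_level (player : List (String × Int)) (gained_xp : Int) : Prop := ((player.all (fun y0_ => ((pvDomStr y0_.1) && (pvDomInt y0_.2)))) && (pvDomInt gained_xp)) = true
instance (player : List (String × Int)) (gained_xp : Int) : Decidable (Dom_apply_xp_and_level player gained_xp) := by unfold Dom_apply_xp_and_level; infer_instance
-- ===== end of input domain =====

-- B replaces A's one-level-at-a-time while-loop by a closed-form prefix sum of the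
-- level costs plus exponential + binary search (objective: alternative algorithm;
-- fewer steps in the number of level-ups, not measured faster here).  Both Pythons
-- mutate player["xp"]/["level"] identically; the equivalence proved here is about
-- the RETURN value (the loop touches only those two integer fields, so it is ported
-- over that pair of values).

-- ===== PORT A =====
def needA (current_level : Int) : Int :=
  let level_minus_one := max 0 (current_level - 1)
  100 + 25 * (level_minus_one * level_minus_one)

theorem needA_ge (l : Int) : 100 ≤ needA l := by
  have h := mul_self_nonneg (max 0 (l - 1))
  simp only [needA]; omega

-- the `while True` loop of A over (player["xp"], player["level"], leveled_up)
def loopA (xp level ups : Int) : Int × Int × Int :=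
  if needA level ≤ xp then loopA (xp - needA level) (level + 1) (ups + 1)
  else (xp, level, ups)
termination_by xp.toNat
decreasing_by
  have := needA_ge level; omega

def apply_xp_and_level (player : List (String × Int)) (gained_xp : Int) : List (String × Int) :=
  let d := PySem.Dict.mk player
  let xp0 := PySem.Dict.getD d "xp" 0 + gained_xp
  let r := loopA xp0 (PySem.Dict.getD d "level" 1) 0
  [("leveled_up", r.2.2), ("xp_to_next", needA r.2.1 - r.1)]

-- ===== PORT B =====
def triB (n : Int) : Int := PySem.Int.floordiv (n * (n + 1) * (2 * n + 1)) 6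

def costB (L k : Int) : Int := 100 * k + 25 * (triB (L - 2 + k) - triB (L - 2))

def needB (current_level : Int) : Int :=
  let m := max 0 (current_level - 1)
  100 + 25 * m * m

theorem triB_succ (n : Int) : triB (n + 1) = triB n + (n + 1) * (n + 1) := by
  have key : (n + 1) * ((n + 1) + 1) * (2 * (n + 1) + 1)
      = n * (n + 1) * (2 * n + 1) + ((n + 1) * (n + 1)) * 6 := by ring
  simp only [triB, PySem.Int.floordiv_eq_ediv_of_pos (by norm_num : (0:Int) < 6), key,
    Int.add_mul_ediv_right _ _ (by norm_num : (6:Int) ≠ 0)]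

theorem triB_mono (n : Int) (k : Nat) : triB n ≤ triB (n + k) := by
  induction k with
  | zero => simp
  | succ k ih =>
    have h : n + ((k + 1 : Nat) : Int) = (n + k) + 1 := by push_cast; ring
    rw [h, triB_succ]
    have := mul_self_nonneg (n + k + 1)
    omega

theorem costB_ge (L k : Int) (hk : 0 ≤ k) : 100 * k ≤ costB L k := by
  have h := triB_mono (L - 2) k.toNat
  rw [Int.toNat_of_nonneg hk] at h
  simp only [costB]; omega

-- `while _cost(level, 2*hi) <= xp: hi *= 2`
def growB (L xp hi : Int) (hpos : 0 < hi) : Int :=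
  if costB L (2 * hi) ≤ xp then growB L xp (2 * hi) (by omega) else hi
termination_by (xp + 1 - 100 * hi).toNat
decreasing_by
  rename_i h
  have := costB_ge L (2 * hi) (by omega)
  omega

-- `while lo + 1 < hi2: …` binary search
def bisectB (L xp lo hi : Int) : Int :=
  if lo + 1 < hi then
    let mid := PySem.Int.floordiv (lo + hi) 2
    if costB L mid ≤ xp then bisectB L xp mid hi else bisectB L xp lo mid
  else lo
termination_by (hi - lo).toNat
decreasing_by
  · rename_i h _
    rw [PySem.Int.floordiv_eq_ediv_of_pos (by norm_num : (0:Int) < 2)]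
    omega
  · rename_i h _
    rw [PySem.Int.floordiv_eq_ediv_of_pos (by norm_num : (0:Int) < 2)]
    omega

def apply_xp_and_level_alt (player : List (String × Int)) (gained_xp : Int) : List (String × Int) :=
  let d := PySem.Dict.mk player
  let xp := PySem.Dict.getD d "xp" 0 + gained_xp
  let level := PySem.Dict.getD d "level" 1
  -- phase 1: below level 1 every step costs a flat 100
  let m := if level < 1 then max 0 (min (1 - level) (PySem.Int.floordiv xp 100)) else 0
  let level1 := level + m
  let xp1 := xp - 100 * m
  -- phase 2: exponential + binary search for the number k of further level-ups
  if 1 ≤ level1 ∧ costB level1 1 ≤ xp1 then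
    let hi := growB level1 xp1 1 (by norm_num)
    let k := bisectB level1 xp1 hi (2 * hi)
    [("leveled_up", m + k), ("xp_to_next", needB (level1 + k) - (xp1 - costB level1 k))]
  else
    [("leveled_up", m), ("xp_to_next", needB level1 - xp1)]

-- ===== PRECONDITION & SPEC =====
def Spec_apply_xp_and_level (player : List (String × Int)) (gained_xp : Int) (out : List (String × Int)) : Prop := out = apply_xp_and_level_alt player gained_xp
instance (player : List (String × Int)) (gained_xp : Int) (out : List (String × Int)) : Decidable (Spec_apply_xp_and_level player gained_xp out) := by unfold Spec_apply_xp_and_level; infer_instance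

-- ===== CLAIM (what is proved, stated in full; the proofs are below) =====
def Claim_equal_apply_xp_and_level : Prop := ∀ (player : List (String × Int)) (gained_xp : Int), Dom_apply_xp_and_level player gained_xp → Spec_apply_xp_and_level player gained_xp (apply_xp_and_level player gained_xp)

-- ===== LEMMAS AND PROOFS =====

theorem needB_eq (l : Int) : needB l = needA l := by
  simp only [needA, needB]; ring

theorem costB_zero (L : Int) : costB L 0 = 0 := by simp [costB]

theorem costB_succ (L k : Int) (hL : 1 ≤ L) (hk : 0 ≤ k) :
    costB L (k + 1) = costB L k + needA (L + k) := by
  have hmax : max 0 (L + k - 1) = L + k - 1 := by omega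
  have ht : triB (L - 2 + (k + 1)) = triB (L - 2 + k) + (L - 2 + k + 1) * (L - 2 + k + 1) := by
    have h : L - 2 + (k + 1) = (L - 2 + k) + 1 := by ring
    rw [h, triB_succ]
  simp only [costB, needA, hmax, ht]; ring

theorem costB_one (L : Int) (hL : 1 ≤ L) : costB L 1 = needA L := by
  have := costB_succ L 0 hL le_rfl
  rw [costB_zero] at this; simpa using this

theorem costB_one_le (L : Int) (hL : 1 ≤ L) (k : Nat) : costB L 1 ≤ costB L (k + 1) := by
  induction k with
  | zero => simp
  | succ k ih =>
    have h : ((k + 1 : Nat) : Int) + 1 = (k : Int) + 1 + 1 := by push_cast; ring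
    rw [h, costB_succ L ((k : Int) + 1) hL (by positivity)]
    have := needA_ge (L + ((k : Int) + 1))
    omega

theorem costB_shift (L : Int) (hL : 1 ≤ L) (k : Nat) :
    costB L (k + 1) = needA L + costB (L + 1) k := by
  induction k with
  | zero => simp [costB_zero, costB_one L hL]
  | succ k ih =>
    have h1 : ((k + 1 : Nat) : Int) + 1 = ((k : Int) + 1) + 1 := by push_cast; ring
    have h2 : ((k + 1 : Nat) : Int) = (k : Int) + 1 := by push_cast; ring
    rw [h1, costB_succ L ((k : Int) + 1) hL (by positivity), h2,
      costB_succ (L + 1) (k : Int) (by omega) (by positivity)]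
    have h3 : L + ((k : Int) + 1) = L + 1 + (k : Int) := by ring
    rw [h3]; omega

theorem loopA_eq (k : Nat) : ∀ (L xp ups : Int), 1 ≤ L → costB L k ≤ xp → xp < costB L (k + 1) →
    loopA xp L ups = (xp - costB L k, L + k, ups + k) := by
  induction k with
  | zero =>
    intro L xp ups hL hlo hhi
    simp only [Nat.cast_zero, zero_add] at hlo hhi ⊢
    rw [costB_one L hL] at hhi
    rw [loopA, if_neg (by omega)]
    simp [costB_zero]
  | succ k ih =>
    intro L xp ups hL hlo hhi
    have hcast : ((k + 1 : Nat) : Int) = (k : Int) + 1 := by push_cast; ring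
    have hc1 := costB_one_le L hL k
    rw [costB_one L hL] at hc1
    rw [hcast] at hlo hhi ⊢
    have hsh1 := costB_shift L hL k
    have hsh2 := costB_shift L hL (k + 1)
    rw [hcast] at hsh2
    have hfire : needA L ≤ xp := by omega
    rw [loopA, if_pos hfire]
    rw [ih (L + 1) (xp - needA L) (ups + 1) (by omega) (by omega) (by omega)]
    rw [hsh1]
    simp only [Prod.mk.injEq]
    refine ⟨by omega, by omega, by omega⟩

theorem loopA_low (m : Nat) : ∀ (L xp ups : Int), L + m ≤ 1 → 100 * m ≤ xp →
    loopA xp L ups = loopA (xp - 100 * m) (L + m) (ups + m) := by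
  induction m with
  | zero => intro L xp ups _ _; simp
  | succ m ih =>
    intro L xp ups hle hxp
    have hcast : ((m + 1 : Nat) : Int) = (m : Int) + 1 := by push_cast; ring
    rw [hcast] at hle hxp ⊢
    have hneed : needA L = 100 := by
      have hmax : max 0 (L - 1) = 0 := by omega
      simp [needA, hmax]
    rw [loopA, if_pos (by omega), hneed,
      ih (L + 1) (xp - 100) (ups + 1) (by omega) (by omega)]
    have e1 : xp - 100 - 100 * (m : Int) = xp - 100 * ((m : Int) + 1) := by ring
    have e2 : L + 1 + (m : Int) = L + ((m : Int) + 1) := by ring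
    have e3 : ups + 1 + (m : Int) = ups + ((m : Int) + 1) := by ring
    rw [e1, e2, e3]

theorem growB_step (L xp hi : Int) (hpos : 0 < hi) (h : costB L (2 * hi) ≤ xp) :
    growB L xp hi hpos = growB L xp (2 * hi) (by omega) := by
  rw [growB]; simp [h]

theorem growB_stop (L xp hi : Int) (hpos : 0 < hi) (h : ¬ costB L (2 * hi) ≤ xp) :
    growB L xp hi hpos = hi := by
  rw [growB]; simp [h]

theorem growB_spec (L xp : Int) : ∀ (hi : Int) (hpos : 0 < hi), costB L hi ≤ xp →
    hi ≤ growB L xp hi hpos ∧ costB L (growB L xp hi hpos) ≤ xp ∧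
      xp < costB L (2 * growB L xp hi hpos) := by
  intro hi hpos
  induction hi, hpos using growB.induct L xp with
  | case1 hi hpos h ih =>
    intro _
    rw [growB_step L xp hi hpos h]
    have := ih h
    omega
  | case2 hi hpos h =>
    intro hle
    rw [growB_stop L xp hi hpos h]
    omega

theorem bisectB_step (L xp lo hi : Int) (h : lo + 1 < hi) :
    bisectB L xp lo hi =
      if costB L (PySem.Int.floordiv (lo + hi) 2) ≤ xp then
        bisectB L xp (PySem.Int.floordiv (lo + hi) 2) hi
      else bisectB L xp lo (PySem.Int.floordiv (lo + hi) 2) := by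
  rw [bisectB]; simp [h]

theorem bisectB_stop (L xp lo hi : Int) (h : ¬ lo + 1 < hi) : bisectB L xp lo hi = lo := by
  rw [bisectB]; simp [h]

theorem bisectB_spec (L xp : Int) : ∀ (lo hi : Int), lo < hi → costB L lo ≤ xp →
    xp < costB L hi →
    lo ≤ bisectB L xp lo hi ∧ costB L (bisectB L xp lo hi) ≤ xp ∧
      xp < costB L (bisectB L xp lo hi + 1) := by
  intro lo hi
  induction lo, hi using bisectB.induct L xp with
  | case1 lo hi h mid hc ih =>
    intro _ hlo hhi
    have hmideq : mid = PySem.Int.floordiv (lo + hi) 2 := rfl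
    have hmid : lo < mid ∧ mid < hi := by
      rw [hmideq, PySem.Int.floordiv_eq_ediv_of_pos (by norm_num : (0:Int) < 2)]
      omega
    rw [bisectB_step L xp lo hi h, ← hmideq, if_pos hc]
    have := ih hmid.2 hc hhi
    omega
  | case2 lo hi h mid hc ih =>
    intro _ hlo hhi
    have hmideq : mid = PySem.Int.floordiv (lo + hi) 2 := rfl
    have hmid : lo < mid ∧ mid < hi := by
      rw [hmideq, PySem.Int.floordiv_eq_ediv_of_pos (by norm_num : (0:Int) < 2)]
      omega
    rw [bisectB_step L xp lo hi h, ← hmideq, if_neg hc]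
    have := ih hmid.1 hlo (by omega)
    omega
  | case3 lo hi h =>
    intro hlt hlo hhi
    rw [bisectB_stop L xp lo hi h]
    have he : hi = lo + 1 := by omega
    rw [he] at hhi
    omega

-- the two ports agree for every starting (xp, level) pair
theorem core_eq (xp L m : Int)
    (hm : m = if L < 1 then max 0 (min (1 - L) (PySem.Int.floordiv xp 100)) else 0) :
    [(("leveled_up" : String), (loopA xp L 0).2.2),
     (("xp_to_next" : String), needA (loopA xp L 0).2.1 - (loopA xp L 0).1)]
    = if 1 ≤ L + m ∧ costB (L + m) 1 ≤ xp - 100 * m then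
        [(("leveled_up" : String),
            m + bisectB (L + m) (xp - 100 * m) (growB (L + m) (xp - 100 * m) 1 one_pos)
                  (2 * growB (L + m) (xp - 100 * m) 1 one_pos)),
         (("xp_to_next" : String),
            needB (L + m + bisectB (L + m) (xp - 100 * m) (growB (L + m) (xp - 100 * m) 1 one_pos)
                  (2 * growB (L + m) (xp - 100 * m) 1 one_pos))
              - (xp - 100 * m - costB (L + m)
                  (bisectB (L + m) (xp - 100 * m) (growB (L + m) (xp - 100 * m) 1 one_pos)
                    (2 * growB (L + m) (xp - 100 * m) 1 one_pos))))]
      else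
        [(("leveled_up" : String), m), (("xp_to_next" : String), needB (L + m) - (xp - 100 * m))] := by
  have hql : PySem.Int.floordiv xp 100 * 100 ≤ xp :=
    (PySem.Int.le_floordiv_iff_mul_le (by norm_num)).mp le_rfl
  have hqu : xp < (PySem.Int.floordiv xp 100 + 1) * 100 :=
    (PySem.Int.floordiv_lt_iff_lt_mul (by norm_num)).mp (by omega)
  set q := PySem.Int.floordiv xp 100 with hq
  have hm0 : 0 ≤ m := by rw [hm]; split <;> omega
  have hphase1 : loopA xp L 0 = loopA (xp - 100 * m) (L + m) m := by
    rcases eq_or_lt_of_le hm0 with h0 | h1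
    · rw [← h0]; simp
    · have hmle : L + m ≤ 1 := by rw [hm] at h1 ⊢; split at h1 <;> [skip; omega]; split <;> omega
      have hmq : m ≤ q := by rw [hm] at h1 ⊢; split at h1 <;> omega
      have hmxp : 100 * m ≤ xp := by omega
      have := loopA_low m.toNat L xp 0 (by rw [Int.toNat_of_nonneg hm0]; exact hmle)
        (by rw [Int.toNat_of_nonneg hm0]; exact hmxp)
      rw [this, Int.toNat_of_nonneg hm0]; norm_num
  rw [hphase1]
  by_cases hgo : 1 ≤ L + m ∧ costB (L + m) 1 ≤ xp - 100 * m
  · obtain ⟨hL1, hc1⟩ := hgo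
    have hg := growB_spec (L + m) (xp - 100 * m) 1 one_pos hc1
    have hb := bisectB_spec (L + m) (xp - 100 * m)
      (growB (L + m) (xp - 100 * m) 1 one_pos) (2 * growB (L + m) (xp - 100 * m) 1 one_pos)
      (by omega) hg.2.1 hg.2.2
    set hi := growB (L + m) (xp - 100 * m) 1 one_pos with hhi
    set k := bisectB (L + m) (xp - 100 * m) hi (2 * hi) with hk
    have hk0 : 0 ≤ k := by omega
    have hloop := loopA_eq k.toNat (L + m) (xp - 100 * m) m hL1
      (by rw [Int.toNat_of_nonneg hk0]; exact hb.2.1)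
      (by rw [Int.toNat_of_nonneg hk0]; exact hb.2.2)
    rw [Int.toNat_of_nonneg hk0] at hloop
    rw [if_pos ⟨hL1, hc1⟩, hloop]
    simp [needB_eq]
  · rw [if_neg hgo]
    have hstop : ¬ needA (L + m) ≤ xp - 100 * m := by
      by_cases hL1 : 1 ≤ L + m
      · rw [← costB_one (L + m) hL1]
        intro hc; exact hgo ⟨hL1, hc⟩
      · have hneed : needA (L + m) = 100 := by
          have hmax : max 0 (L + m - 1) = 0 := by omega
          simp [needA, hmax]
        rw [hneed]
        -- level1 < 1: phase 1 stopped because xp ran out, so xp1 < 100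
        have hqm : m = max 0 q ∧ q < 1 - L := by
          rw [hm]; split
          · omega
          · omega
        omega
    rw [loopA, if_neg hstop]
    simp [needB_eq]

-- ===== VERDICT (by name: the statement is the Claim_ definition above) =====
theorem apply_xp_and_level_spec : Claim_equal_apply_xp_and_level := by
  intro player gained_xp _
  show apply_xp_and_level player gained_xp = apply_xp_and_level_alt player gained_xp
  simp only [apply_xp_and_level, apply_xp_and_level_alt]
  exact core_eq _ _ _ rfl
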